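-- pv_equiv track=rewrite | github.com/dmedlin87/nashville-numbers | src/nashville_numbers/voicing.py | _build_voicing
-- ===== SOURCE A (Python) =====
-- def _build_voicing(pcs: list[int], root_val: int, style: str) -> list[int]:
--     """Build ascending MIDI notes from pitch classes in the given voicing style."""
--     base_root = 48 + root_val
--     midis: list[int] = []
--     previous = base_root - 1
--
--     for pc in pcs:
--         midi = base_root + ((pc - root_val + 12) % 12)
--         while midi <= previous:
--             midi += 12
--         if midi not in midis:
--             midis.append(midi)
--             previous = midi
--
--     midis = midis[:8]
--     return _apply_drop(midis, style)
--
-- def _apply_drop(midis: list[int], style: str) -> list[int]: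
--     """Apply drop-2 or drop-3 voicing to a sorted note list."""
--     if style == "drop2" and len(midis) >= 3:
--         midis[len(midis) - 2] -= 12
--         midis.sort()
--     elif style == "drop3" and len(midis) >= 4:
--         midis[len(midis) - 3] -= 12
--         midis.sort()
--     return midis
-- ===== SOURCE B (Python) =====
-- def _build_voicing(pcs: list[int], root_val: int, style: str) -> list[int]:
--     """Build ascending MIDI notes from pitch classes in the given voicing style."""
--     base_root = 48 + root_val
--     notes: list[int] = []
--     prev = base_root - 1
--     # Each pitch class yields exactly one note strictly above the previous one,
--     # so only the first 8 pitch classes can ever contribute.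
--     for pc in pcs[:8]:
--         midi = base_root + (pc - root_val) % 12
--         if midi <= prev:
--             midi += 12 * ((prev - midi) // 12 + 1)
--         notes.append(midi)
--         prev = midi
--     # Drop voicings: move one note down an octave and re-insert it in order
--     # (the remaining notes are already sorted, so no full sort is needed).
--     if style == "drop2" and len(notes) >= 3:
--         notes = _reinsert(notes, len(notes) - 2)
--     elif style == "drop3" and len(notes) >= 4:
--         notes = _reinsert(notes, len(notes) - 3)
--     return notes
--
--
-- def _reinsert(notes: list[int], idx: int) -> list[int]:
--     """Remove notes[idx], lower it an octave, insert into the sorted remainder."""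
--     v = notes[idx] - 12
--     rest = notes[:idx] + notes[idx + 1:]
--     i = 0
--     while i < len(rest) and rest[i] < v:
--         i += 1
--     return rest[:i] + [v] + rest[i:]
-- ===== Notes on version B (the rewrite author's own statement) =====
-- stated objective: faster
-- what changed: B truncates pcs to the first 8 up front (each pitch class provably yields exactly one strictly-increasing note, so the membership test and the trailing [:8] slice are redundant), replaces the octave-bumping while-loop with a closed-form octave count, and applies the drop voicing by removing the note and linearly re-inserting it into the still-sorted remainder instead of mutate-and-sort.
import Mathlib
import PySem

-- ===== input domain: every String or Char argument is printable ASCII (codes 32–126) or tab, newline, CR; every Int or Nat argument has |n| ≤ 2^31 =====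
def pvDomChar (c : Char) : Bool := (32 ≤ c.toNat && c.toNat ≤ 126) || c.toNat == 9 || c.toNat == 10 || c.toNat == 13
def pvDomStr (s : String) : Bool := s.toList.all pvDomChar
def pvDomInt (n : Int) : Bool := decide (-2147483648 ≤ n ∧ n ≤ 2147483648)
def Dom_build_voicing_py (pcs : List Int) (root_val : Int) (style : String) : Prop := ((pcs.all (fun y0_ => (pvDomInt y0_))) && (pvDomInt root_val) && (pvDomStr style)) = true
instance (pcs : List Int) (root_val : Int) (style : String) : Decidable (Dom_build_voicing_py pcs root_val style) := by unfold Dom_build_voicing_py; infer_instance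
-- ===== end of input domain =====

-- B replaces A's octave-bumping while-loop by a closed-form octave count, iterates only
-- the first 8 pitch classes (dropping the redundant membership test and trailing slice),
-- and applies the drop voicing by a linear re-insert instead of mutate-and-sort.

-- ===== PORT A =====
-- `while midi <= previous: midi += 12`
def pvBumpA (previous midi : Int) : Int :=
  if midi ≤ previous then pvBumpA previous (midi + 12) else midi
termination_by (previous + 1 - midi).toNat
decreasing_by omega

-- one iteration of A's `for pc in pcs` loop; state = (midis, previous)
def pvStepA (base_root root_val : Int) (st : List Int × Int) (pc : Int) : List Int × Int :=
  let midi := pvBumpA st.2 (base_root + PySem.Int.mod (pc - root_val + 12) 12)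
  if midi ∈ st.1 then st else (st.1 ++ [midi], midi)

-- `_apply_drop`: `midis[len(midis)-k] -= 12; midis.sort()` (getD is exact: index in range under the guard)
def pvApplyDropA (midis : List Int) (style : String) : List Int :=
  if style = "drop2" ∧ 3 ≤ midis.length then
    PySem.List.sorted (midis.set (midis.length - 2) (midis.getD (midis.length - 2) 0 - 12)) (fun x => x) false
  else if style = "drop3" ∧ 4 ≤ midis.length then
    PySem.List.sorted (midis.set (midis.length - 3) (midis.getD (midis.length - 3) 0 - 12)) (fun x => x) false
  else midis

-- base_root = 48 + root_val is inlined at its two use sites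
def build_voicing_py (pcs : List Int) (root_val : Int) (style : String) : List Int :=
  pvApplyDropA ((pcs.foldl (pvStepA (48 + root_val) root_val) ([], 48 + root_val - 1)).1.take 8) style

-- ===== PORT B =====
-- B's closed-form bump: midi, then `if midi <= prev: midi += 12 * ((prev - midi)//12 + 1)`
def pvMidiB (base_root root_val previous pc : Int) : Int :=
  let m := base_root + PySem.Int.mod (pc - root_val) 12
  if m ≤ previous then m + 12 * (PySem.Int.floordiv (previous - m) 12 + 1) else m

-- one iteration of B's loop: unconditional append, prev := midi
def pvStepB (base_root root_val : Int) (st : List Int × Int) (pc : Int) : List Int × Int :=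
  (st.1 ++ [pvMidiB base_root root_val st.2 pc], pvMidiB base_root root_val st.2 pc)

-- `while i < len(rest) and rest[i] < v: i += 1`
def pvFindPos : List Int → Int → Nat
  | [], _ => 0
  | x :: xs, v => if x < v then pvFindPos xs v + 1 else 0

-- `_reinsert`: remove notes[idx], lower an octave, insert into the sorted remainder
def pvReinsert (notes : List Int) (idx : Nat) : List Int :=
  let v := notes.getD idx 0 - 12
  let rest := notes.take idx ++ notes.drop (idx + 1)
  let i := pvFindPos rest v
  rest.take i ++ [v] ++ rest.drop i

-- B's drop-voicing dispatch
def pvDropB (notes : List Int) (style : String) : List Int :=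
  if style = "drop2" ∧ 3 ≤ notes.length then pvReinsert notes (notes.length - 2)
  else if style = "drop3" ∧ 4 ≤ notes.length then pvReinsert notes (notes.length - 3)
  else notes

-- base_root = 48 + root_val is inlined at its two use sites
def build_voicing_py_alt (pcs : List Int) (root_val : Int) (style : String) : List Int :=
  pvDropB (((pcs.take 8).foldl (pvStepB (48 + root_val) root_val) ([], 48 + root_val - 1)).1) style

-- ===== PRECONDITION & SPEC =====
def Spec_build_voicing_py (pcs : List Int) (root_val : Int) (style : String) (out : List Int) : Prop := out = build_voicing_py_alt pcs root_val style
instance (pcs : List Int) (root_val : Int) (style : String) (out : List Int) : Decidable (Spec_build_voicing_py pcs root_val style out) := by unfold Spec_build_voicing_py; infer_instance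

-- ===== CLAIM (what is proved, stated in full; the proofs are below) =====
def Claim_equal_build_voicing_py : Prop := ∀ (pcs : List Int) (root_val : Int) (style : String), Dom_build_voicing_py pcs root_val style → Spec_build_voicing_py pcs root_val style (build_voicing_py pcs root_val style)

-- ===== LEMMAS AND PROOFS =====

-- A's while-loop equals B's closed-form octave count
theorem pvBumpA_closed (previous : Int) : ∀ midi : Int,
    pvBumpA previous midi =
      if midi ≤ previous then midi + 12 * (PySem.Int.floordiv (previous - midi) 12 + 1) else midi := by
  intro midi
  induction hn : (previous + 1 - midi).toNat using Nat.strong_induction_on generalizing midi with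
  | _ n ih =>
    rw [pvBumpA]
    by_cases h : midi ≤ previous
    · rw [if_pos h, if_pos h, ih ((previous + 1 - (midi + 12)).toNat) (by omega) _ rfl]
      rw [PySem.Int.floordiv_eq_ediv_of_pos (a := previous - midi) (by norm_num),
        PySem.Int.floordiv_eq_ediv_of_pos (a := previous - (midi + 12)) (by norm_num)]
      split_ifs <;> omega
    · rw [if_neg h, if_neg h]

-- B's midi is strictly above the previous note
theorem pvMidiB_gt (base_root root_val previous pc : Int) :
    previous < pvMidiB base_root root_val previous pc := by
  unfold pvMidiB
  set m := base_root + PySem.Int.mod (pc - root_val) 12 with hm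
  by_cases h : m ≤ previous
  · rw [if_pos h, PySem.Int.floordiv_eq_ediv_of_pos (by norm_num)]
    omega
  · rw [if_neg h]; omega

-- the invariant A's state keeps: notes strictly increase and all are ≤ previous
def pvInv (st : List Int × Int) : Prop := st.1.Pairwise (· < ·) ∧ ∀ x ∈ st.1, x ≤ st.2

theorem pvStep_eq (base_root root_val : Int) (st : List Int × Int) (pc : Int) (h : pvInv st) :
    pvStepA base_root root_val st pc = pvStepB base_root root_val st pc ∧
      pvInv (pvStepB base_root root_val st pc) := by
  have hmod : PySem.Int.mod (pc - root_val + 12) 12 = PySem.Int.mod (pc - root_val) 12 := by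
    rw [PySem.Int.mod_eq_emod_of_pos (by norm_num), PySem.Int.mod_eq_emod_of_pos (by norm_num)]
    omega
  have hgt := pvMidiB_gt base_root root_val st.2 pc
  have hAm : pvBumpA st.2 (base_root + PySem.Int.mod (pc - root_val + 12) 12)
      = pvMidiB base_root root_val st.2 pc := by
    rw [pvBumpA_closed, hmod]; rfl
  have hnm : pvMidiB base_root root_val st.2 pc ∉ st.1 := fun hx =>
    absurd (h.2 _ hx) (by omega)
  refine ⟨?_, ?_, ?_⟩
  · simp only [pvStepA, hAm, if_neg hnm, pvStepB]
  · show (st.1 ++ [pvMidiB base_root root_val st.2 pc]).Pairwise (· < ·)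
    rw [List.pairwise_append]
    refine ⟨h.1, List.pairwise_singleton _ _, ?_⟩
    intro a ha b hb
    rw [List.mem_singleton] at hb
    have := h.2 a ha
    omega
  · show ∀ x ∈ st.1 ++ [pvMidiB base_root root_val st.2 pc], x ≤ pvMidiB base_root root_val st.2 pc
    intro x hx
    rcases List.mem_append.mp hx with hx | hx
    · have := h.2 x hx; omega
    · rw [List.mem_singleton] at hx; omega

theorem pvFold_eq (base_root root_val : Int) :
    ∀ (l : List Int) (st : List Int × Int), pvInv st →
      l.foldl (pvStepA base_root root_val) st = l.foldl (pvStepB base_root root_val) st ∧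
        pvInv (l.foldl (pvStepB base_root root_val) st) := by
  intro l
  induction l with
  | nil => intro st h; exact ⟨rfl, h⟩
  | cons x xs ih =>
    intro st h
    obtain ⟨he, hi⟩ := pvStep_eq base_root root_val st x h
    simp only [List.foldl_cons, he]
    exact ih _ hi

-- each B step appends exactly one note
theorem pvFoldB_shape (base_root root_val : Int) :
    ∀ (l : List Int) (st : List Int × Int),
      ∃ t, (l.foldl (pvStepB base_root root_val) st).1 = st.1 ++ t ∧ t.length = l.length := by
  intro l
  induction l with
  | nil => intro st; exact ⟨[], by simp⟩
  | cons x xs ih =>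
    intro st
    obtain ⟨t, ht, hl⟩ := ih (pvStepB base_root root_val st x)
    refine ⟨[pvMidiB base_root root_val st.2 x] ++ t, ?_, by simp [hl]⟩
    simp only [List.foldl_cons, ht]
    simp [pvStepB]

-- A's full fold followed by take 8 equals B's fold over the first 8 pitch classes
theorem pvTake8 (base_root root_val : Int) (pcs : List Int) (st : List Int × Int)
    (h0 : st.1 = []) :
    (pcs.foldl (pvStepB base_root root_val) st).1.take 8
      = ((pcs.take 8).foldl (pvStepB base_root root_val) st).1 := by
  conv_lhs => rw [← List.take_append_drop 8 pcs]
  rw [List.foldl_append]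
  obtain ⟨t1, ht1, hl1⟩ := pvFoldB_shape base_root root_val (pcs.take 8) st
  obtain ⟨t2, ht2, hl2⟩ := pvFoldB_shape base_root root_val (pcs.drop 8)
    ((pcs.take 8).foldl (pvStepB base_root root_val) st)
  rw [ht2, ht1, h0]
  simp only [List.nil_append] at *
  by_cases hle : 8 ≤ pcs.length
  · have h8 : t1.length = 8 := by rw [hl1, List.length_take]; omega
    rw [List.take_append_of_le_length (by omega), List.take_of_length_le (by omega)]
  · have hd : pcs.drop 8 = [] := List.drop_eq_nil_of_le (by omega)
    have ht2n : t2 = [] := by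
      rw [hd] at hl2
      exact List.eq_nil_of_length_eq_zero (by simpa using hl2)
    subst ht2n
    rw [List.append_nil]
    exact List.take_of_length_le (by rw [hl1, List.length_take]; omega)

-- re-inserting v into a sorted list: sorted, and a permutation of v :: rest
theorem pvFindPos_insert (v : Int) :
    ∀ (rest : List Int), rest.Pairwise (· ≤ ·) →
      (rest.take (pvFindPos rest v) ++ [v] ++ rest.drop (pvFindPos rest v)).Pairwise (· ≤ ·) ∧
        (rest.take (pvFindPos rest v) ++ [v] ++ rest.drop (pvFindPos rest v)).Perm (v :: rest) := by
  intro rest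
  induction rest with
  | nil => intro _; simp
  | cons x xs ih =>
    intro h
    rw [List.pairwise_cons] at h
    by_cases hlt : x < v
    · obtain ⟨hp, hperm⟩ := ih h.2
      simp only [pvFindPos, if_pos hlt, List.take_succ_cons, List.drop_succ_cons, List.cons_append]
      constructor
      · rw [List.pairwise_cons]
        refine ⟨?_, hp⟩
        intro a ha
        rcases List.mem_cons.mp (hperm.mem_iff.mp ha) with rfl | hmem
        · omega
        · exact h.1 a hmem
      · exact (hperm.cons x).trans (List.Perm.swap v x xs)
    · simp only [pvFindPos, if_neg hlt, List.take_zero, List.drop_zero, List.nil_append,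
        List.singleton_append]
      refine ⟨?_, List.Perm.refl _⟩
      rw [List.pairwise_cons]
      refine ⟨?_, List.pairwise_cons.mpr h⟩
      intro a ha
      rcases List.mem_cons.mp ha with rfl | hmem
      · omega
      · have := h.1 a hmem; omega

-- mutate-and-sort equals remove-and-reinsert on a ≤-sorted list
theorem pvDrop_eq (l : List Int) (idx : Nat) (hidx : idx < l.length)
    (hs : l.Pairwise (· ≤ ·)) :
    PySem.List.sorted (l.set idx (l.getD idx 0 - 12)) (fun x => x) false = pvReinsert l idx := by
  have hrest : (l.take idx ++ l.drop (idx + 1)) = l.eraseIdx idx :=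
    (List.eraseIdx_eq_take_drop_succ l idx).symm
  have hrs : (l.take idx ++ l.drop (idx + 1)).Pairwise (· ≤ ·) := by
    rw [hrest]; exact hs.sublist (List.eraseIdx_sublist l idx)
  obtain ⟨hp, hperm⟩ := pvFindPos_insert (l.getD idx 0 - 12) (l.take idx ++ l.drop (idx + 1)) hrs
  have hset : (l.set idx (l.getD idx 0 - 12)).Perm
      ((l.getD idx 0 - 12) :: (l.take idx ++ l.drop (idx + 1))) := by
    rw [List.set_eq_take_append_cons_drop, if_pos hidx]
    exact List.perm_middle
  exact PySem.List.sorted_id_eq_of_perm_of_pairwise _ _ (hperm.trans hset.symm) hp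

-- the two drop dispatches agree on a sorted note list
theorem pvApplyDrop_eq (notes : List Int) (style : String) (hs : notes.Pairwise (· ≤ ·)) :
    pvApplyDropA notes style = pvDropB notes style := by
  unfold pvApplyDropA pvDropB
  split
  · next h => exact pvDrop_eq notes (notes.length - 2) (by omega) hs
  · split
    · next h => exact pvDrop_eq notes (notes.length - 3) (by omega) hs
    · rfl

-- ===== VERDICT (by name: the statement is the Claim_ definition above) =====
theorem build_voicing_py_spec : Claim_equal_build_voicing_py := by
  intro pcs root_val style _
  unfold Spec_build_voicing_py build_voicing_py build_voicing_py_alt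
  have hinv : pvInv (([] : List Int), 48 + root_val - 1) := ⟨List.Pairwise.nil, by simp⟩
  rw [(pvFold_eq (48 + root_val) root_val pcs _ hinv).1,
    pvTake8 (48 + root_val) root_val pcs _ rfl]
  exact pvApplyDrop_eq _ style
    (((pvFold_eq (48 + root_val) root_val (pcs.take 8) _ hinv).2.1).imp (fun h => le_of_lt h))
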